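-- pv_equiv track=rewrite | github.com/laoyu17/shenrengongju | rtos_sim/ui/table_validation.py | build_resource_table_errors
-- ===== SOURCE A (Python) =====
-- CellKey = tuple[int, int]
--
-- def build_resource_table_errors(rows: list[dict[str, str]], valid_protocols: set[str]) -> dict[CellKey, str]:
--     """Return cell-level validation errors for the resource table."""
--     errors: dict[CellKey, str] = {}
--     id_counts: dict[str, int] = {}
--     for row in rows:
--         resource_id = (row.get("id") or "").strip()
--         if resource_id:
--             id_counts[resource_id] = id_counts.get(resource_id, 0) + 1
--
--     for row_idx, row in enumerate(rows):
--         resource_id = (row.get("id") or "").strip()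
--         resource_name = (row.get("name") or "").strip()
--         bound_core_id = (row.get("bound_core_id") or "").strip()
--         protocol = (row.get("protocol") or "").strip()
--
--         if not resource_id:
--             errors[(row_idx, 0)] = "resource.id can not be empty"
--         elif id_counts.get(resource_id, 0) > 1:
--             errors[(row_idx, 0)] = "resource.id must be unique"
--
--         if not resource_name:
--             errors[(row_idx, 1)] = "resource.name can not be empty"
--
--         if not bound_core_id:
--             errors[(row_idx, 2)] = "bound_core_id can not be empty"
--
--         if protocol not in valid_protocols:
--             errors[(row_idx, 3)] = "protocol must be mutex/pip/pcp"
--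
--     return errors
-- ===== SOURCE B (Python) =====
-- CellKey = tuple[int, int]
--
-- def build_resource_table_errors(rows: list[dict[str, str]], valid_protocols: set[str]) -> dict[CellKey, str]:
--     """Recursive per-row validation; a duplicate id is one that also occurs in some other row."""
--     ids = [(row.get("id") or "").strip() for row in rows]
--
--     def row_errors(idx):
--         if idx == len(rows):
--             return []
--         row = rows[idx]
--         out = []
--         rid = ids[idx]
--         if not rid:
--             out.append(((idx, 0), "resource.id can not be empty"))
--         elif rid in ids[:idx] or rid in ids[idx + 1:]:
--             out.append(((idx, 0), "resource.id must be unique"))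
--         if not (row.get("name") or "").strip():
--             out.append(((idx, 1), "resource.name can not be empty"))
--         if not (row.get("bound_core_id") or "").strip():
--             out.append(((idx, 2), "bound_core_id can not be empty"))
--         if (row.get("protocol") or "").strip() not in valid_protocols:
--             out.append(((idx, 3), "protocol must be mutex/pip/pcp"))
--         return out + row_errors(idx + 1)
--
--     return {key: msg for key, msg in row_errors(0)}
-- ===== Notes on version B (the rewrite author's own statement) =====
-- stated objective: alternative
-- what changed: Drops A's id-counting pre-pass and dict-mutating loop entirely: B recurses over row indices in a single pass, deciding 'duplicate id' by membership of the stripped id in the slices of ids before and after the current row, and builds the result dict from the concatenated per-row entry lists.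
import Mathlib
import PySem

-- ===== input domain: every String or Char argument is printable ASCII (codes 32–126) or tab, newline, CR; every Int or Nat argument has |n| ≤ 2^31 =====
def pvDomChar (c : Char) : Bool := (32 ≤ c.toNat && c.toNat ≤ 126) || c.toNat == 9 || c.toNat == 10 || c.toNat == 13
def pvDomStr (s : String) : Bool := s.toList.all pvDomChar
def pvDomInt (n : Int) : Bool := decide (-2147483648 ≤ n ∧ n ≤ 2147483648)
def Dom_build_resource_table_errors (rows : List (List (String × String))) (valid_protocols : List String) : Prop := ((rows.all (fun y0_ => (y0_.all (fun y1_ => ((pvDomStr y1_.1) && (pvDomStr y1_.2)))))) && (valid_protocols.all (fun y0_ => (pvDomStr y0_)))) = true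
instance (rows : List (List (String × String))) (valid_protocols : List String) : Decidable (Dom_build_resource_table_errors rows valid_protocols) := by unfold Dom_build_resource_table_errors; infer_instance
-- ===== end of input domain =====

-- B drops A's id-counting pre-pass and dict-mutating loop: it recurses over row indices once,
-- deciding "duplicate id" by membership in the id slices before/after the current row, and builds
-- the dict from concatenated per-row entry lists (objective: alternative algorithm; return-value equivalence).


-- ===== PORT A =====
-- errors[(i, j)] = v : dict assignment on the CellKey-keyed dict, represented as a list of
-- (i, j, v) triples (the required return type); exact: overwrite in place, new keys append.
def dset (d : List (Int × Int × String)) (i j : Int) (v : String) :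
    List (Int × Int × String) :=
  if d.any (fun e => e.1 == i && e.2.1 == j) then
    d.map (fun e => if e.1 == i && e.2.1 == j then (i, j, v) else e)
  else d ++ [(i, j, v)]

-- (row.get(k) or "").strip()
def getStrip (row : List (String × String)) (k : String) : String :=
  PySem.Str.strip (((PySem.Dict.mk row).get? k).getD "")

def build_resource_table_errors (rows : List (List (String × String))) (valid_protocols : List String) : List (Int × Int × String) :=
  let id_counts : PySem.Dict String Int :=
    rows.foldl (fun c row =>
      let resource_id := getStrip row "id"
      if resource_id ≠ "" then c.insert resource_id (c.getD resource_id 0 + 1) else c)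
      PySem.Dict.empty
  (PySem.List.enumerate rows 0).foldl (fun errors p =>
    let row_idx := p.1
    let row := p.2
    let resource_id := getStrip row "id"
    let resource_name := getStrip row "name"
    let bound_core_id := getStrip row "bound_core_id"
    let protocol := getStrip row "protocol"
    let errors :=
      if resource_id = "" then dset errors row_idx 0 "resource.id can not be empty"
      else if 1 < id_counts.getD resource_id 0 then
        dset errors row_idx 0 "resource.id must be unique"
      else errors
    let errors :=
      if resource_name = "" then dset errors row_idx 1 "resource.name can not be empty"
      else errors
    let errors :=
      if bound_core_id = "" then dset errors row_idx 2 "bound_core_id can not be empty"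
      else errors
    let errors :=
      if ¬ (PySem.Set.contains valid_protocols protocol = true) then
        dset errors row_idx 3 "protocol must be mutex/pip/pcp"
      else errors
    errors) []

-- ===== PORT B =====
-- row_errors(idx): the recursive helper; python tests 'idx == len(rows)' and only ever reaches
-- idx ≤ len(rows), where that test coincides with the '≤' guard used here to make the
-- recursion total (a totality guard only, not an algorithm switch).
def rowErrors (rows : List (List (String × String))) (ids : List String)
    (valid_protocols : List String) (idx : Nat) : List (Int × Int × String) :=
  if h : rows.length ≤ idx then []
  else
    let row := PySem.List.pyGetD rows (idx : Int) []          -- rows[idx], idx in range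
    let rid := PySem.List.pyGetD ids (idx : Int) ""           -- ids[idx], idx in range
    let out : List (Int × Int × String) :=
      (if rid = "" then [((idx : Int), 0, "resource.id can not be empty")]
       else if (PySem.List.slice ids none (some (idx : Int))).contains rid
             || (PySem.List.slice ids (some ((idx : Int) + 1)) none).contains rid then
         [((idx : Int), 0, "resource.id must be unique")]
       else []) ++
      (if getStrip row "name" = "" then [((idx : Int), 1, "resource.name can not be empty")] else []) ++
      (if getStrip row "bound_core_id" = "" then [((idx : Int), 2, "bound_core_id can not be empty")] else []) ++
      (if ¬ (PySem.Set.contains valid_protocols (getStrip row "protocol") = true) then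
        [((idx : Int), 3, "protocol must be mutex/pip/pcp")] else [])
    out ++ rowErrors rows ids valid_protocols (idx + 1)
termination_by rows.length - idx
decreasing_by omega

def build_resource_table_errors_alt (rows : List (List (String × String))) (valid_protocols : List String) : List (Int × Int × String) :=
  let ids := rows.map (fun row => getStrip row "id")
  -- {key: msg for key, msg in row_errors(0)}: fold dict assignment over the entry list
  (rowErrors rows ids valid_protocols 0).foldl (fun d e => dset d e.1 e.2.1 e.2.2) []

-- ===== PRECONDITION & SPEC =====
def Spec_build_resource_table_errors (rows : List (List (String × String))) (valid_protocols : List String) (out : List (Int × Int × String)) : Prop := out = build_resource_table_errors_alt rows valid_protocols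
instance (rows : List (List (String × String))) (valid_protocols : List String) (out : List (Int × Int × String)) : Decidable (Spec_build_resource_table_errors rows valid_protocols out) := by unfold Spec_build_resource_table_errors; infer_instance

-- ===== CLAIM (what is proved, stated in full; the proofs are below) =====
def Claim_equal_build_resource_table_errors : Prop := ∀ (rows : List (List (String × String))) (valid_protocols : List String), Dom_build_resource_table_errors rows valid_protocols → Spec_build_resource_table_errors rows valid_protocols (build_resource_table_errors rows valid_protocols)

-- ===== LEMMAS AND PROOFS =====

-- the entries A's loop body writes for one row, as a list (A's id_counts condition)
def rowErrA (id_counts : PySem.Dict String Int) (valid_protocols : List String)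
    (i : Int) (row : List (String × String)) : List (Int × Int × String) :=
  (if getStrip row "id" = "" then [(i, 0, "resource.id can not be empty")]
   else if 1 < id_counts.getD (getStrip row "id") 0 then [(i, 0, "resource.id must be unique")]
   else []) ++
  (if getStrip row "name" = "" then [(i, 1, "resource.name can not be empty")] else []) ++
  (if getStrip row "bound_core_id" = "" then [(i, 2, "bound_core_id can not be empty")] else []) ++
  (if ¬ (PySem.Set.contains valid_protocols (getStrip row "protocol") = true) then
    [(i, 3, "protocol must be mutex/pip/pcp")] else [])

-- A's id_counts fold counts occurrences among the (nonempty) stripped ids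
theorem counts_foldl (l : List String) (c : PySem.Dict String Int) (x : String) (hx : x ≠ "") :
    (l.foldl (fun c rid => if rid ≠ "" then c.insert rid (c.getD rid 0 + 1) else c) c).getD x 0
      = c.getD x 0 + l.count x := by
  induction l generalizing c with
  | nil => simp
  | cons a t ih =>
    simp only [List.foldl_cons, List.count_cons]
    by_cases ha : a = ""
    · subst ha
      rw [if_neg (by simp), ih c]
      have hxa : (("" : String) == x) = false := by
        simp only [beq_eq_false_iff_ne]
        exact fun h => hx h.symm
      simp [hxa]
    · rw [if_pos ha, ih _, PySem.Dict.getD_insert]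
      by_cases hax : x = a
      · subst hax
        simp only [beq_self_eq_true, if_true]
        push_cast
        ring
      · have hb : (a == x) = false := by
          simp only [beq_eq_false_iff_ne]
          exact fun h => hax h.symm
        simp [hax, hb]

-- one row of A's loop body equals folding dset over that row's entry list
theorem row_step (id_counts : PySem.Dict String Int) (valid_protocols : List String)
    (i : Int) (row : List (String × String)) (d : List (Int × Int × String)) :
    (let resource_id := getStrip row "id"
     let resource_name := getStrip row "name"
     let bound_core_id := getStrip row "bound_core_id"
     let protocol := getStrip row "protocol"
     let errors :=
       if resource_id = "" then dset d i 0 "resource.id can not be empty"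
       else if 1 < id_counts.getD resource_id 0 then
         dset d i 0 "resource.id must be unique"
       else d
     let errors :=
       if resource_name = "" then dset errors i 1 "resource.name can not be empty"
       else errors
     let errors :=
       if bound_core_id = "" then dset errors i 2 "bound_core_id can not be empty"
       else errors
     if ¬ (PySem.Set.contains valid_protocols protocol = true) then
       dset errors i 3 "protocol must be mutex/pip/pcp"
     else errors)
    = (rowErrA id_counts valid_protocols i row).foldl (fun d e => dset d e.1 e.2.1 e.2.2) d := by
  unfold rowErrA
  by_cases h1 : getStrip row "id" = ""
  · by_cases h3 : getStrip row "name" = "" <;>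
    by_cases h4 : getStrip row "bound_core_id" = "" <;>
    by_cases h5 : getStrip row "protocol" ∈ valid_protocols <;>
    simp [h1, h3, h4, h5]
  · by_cases h2 : 1 < id_counts.getD (getStrip row "id") 0 <;>
    by_cases h3 : getStrip row "name" = "" <;>
    by_cases h4 : getStrip row "bound_core_id" = "" <;>
    by_cases h5 : getStrip row "protocol" ∈ valid_protocols <;>
    simp [h1, h2, h3, h4, h5]

-- A's whole loop, generalizing the start index and the accumulated dict
set_option maxHeartbeats 2000000 in
theorem main_fold (rows : List (List (String × String))) (valid_protocols : List String)
    (id_counts : PySem.Dict String Int) :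
    ∀ (i : Int) (d : List (Int × Int × String)),
    (PySem.List.enumerate rows i).foldl (fun errors p =>
      let row_idx := p.1
      let row := p.2
      let resource_id := getStrip row "id"
      let resource_name := getStrip row "name"
      let bound_core_id := getStrip row "bound_core_id"
      let protocol := getStrip row "protocol"
      let errors :=
        if resource_id = "" then dset errors row_idx 0 "resource.id can not be empty"
        else if 1 < id_counts.getD resource_id 0 then
          dset errors row_idx 0 "resource.id must be unique"
        else errors
      let errors :=
        if resource_name = "" then dset errors row_idx 1 "resource.name can not be empty"
        else errors
      let errors :=
        if bound_core_id = "" then dset errors row_idx 2 "bound_core_id can not be empty"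
        else errors
      if ¬ (PySem.Set.contains valid_protocols protocol = true) then
        dset errors row_idx 3 "protocol must be mutex/pip/pcp"
      else errors) d
    = ((PySem.List.enumerate rows i).flatMap
        (fun p => rowErrA id_counts valid_protocols p.1 p.2)).foldl
        (fun d e => dset d e.1 e.2.1 e.2.2) d := by
  induction rows with
  | nil => intro i d; simp [PySem.List.enumerate_nil]
  | cons r t ih =>
    intro i d
    rw [PySem.List.enumerate_cons, List.flatMap_cons, List.foldl_append, List.foldl_cons, ih]
    congr 1
    exact row_step id_counts valid_protocols i r d

-- "rid occurs in another row" (B's slice test) iff "rid occurs more than once" (A's count)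
theorem dup_bridge (ids : List String) (idx : Nat) (h : idx < ids.length) :
    (((ids.take idx).contains ids[idx] || (ids.drop (idx + 1)).contains ids[idx]) = true)
      ↔ 1 < ids.count ids[idx] := by
  have hsplit : ids = ids.take idx ++ ids[idx] :: ids.drop (idx + 1) := by
    have h0 := (List.take_append_drop idx ids).symm
    rwa [List.drop_eq_getElem_cons h] at h0
  have hc : ids.count ids[idx]
      = (ids.take idx).count ids[idx] + ((ids.drop (idx + 1)).count ids[idx] + 1) := by
    calc ids.count ids[idx]
        = (ids.take idx ++ ids[idx] :: ids.drop (idx + 1)).count ids[idx] := by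
          rw [← hsplit]
      _ = _ := by rw [List.count_append, List.count_cons_self]
  have h1 : (ids.take idx).contains ids[idx] = true ↔ 0 < (ids.take idx).count ids[idx] := by
    rw [List.contains_iff_mem, List.count_pos_iff]
  have h2 : (ids.drop (idx + 1)).contains ids[idx] = true ↔
      0 < (ids.drop (idx + 1)).count ids[idx] := by
    rw [List.contains_iff_mem, List.count_pos_iff]
  rw [Bool.or_eq_true, h1, h2, hc]
  omega

set_option maxHeartbeats 1000000 in
theorem rowErrors_eq_aux (rows : List (List (String × String))) (valid_protocols : List String)
    (ids : List String) (hids : ids = rows.map (fun row => getStrip row "id"))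
    (id_counts : PySem.Dict String Int)
    (hcounts : ∀ x, x ≠ "" → id_counts.getD x 0 = ids.count x) :
    ∀ (fuel idx : Nat), rows.length - idx ≤ fuel →
    rowErrors rows ids valid_protocols idx
      = (PySem.List.enumerate (rows.drop idx) (idx : Int)).flatMap
          (fun p => rowErrA id_counts valid_protocols p.1 p.2) := by
  intro fuel
  induction fuel with
  | zero =>
    intro idx hf
    have hle : rows.length ≤ idx := by omega
    rw [rowErrors, dif_pos hle, List.drop_eq_nil_of_le hle, PySem.List.enumerate_nil,
      List.flatMap_nil]
  | succ n ih =>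
    intro idx hf
    by_cases hle : rows.length ≤ idx
    · rw [rowErrors, dif_pos hle, List.drop_eq_nil_of_le hle, PySem.List.enumerate_nil,
        List.flatMap_nil]
    · have hlt : idx < rows.length := by omega
      have hidslen : idx < ids.length := by simp [hids]; omega
      rw [rowErrors, dif_neg hle]
      have hrow : PySem.List.pyGetD rows (idx : Int) [] = rows[idx] := by
        rw [PySem.List.pyGetD_natCast]
        simp [hlt]
      have hrid : PySem.List.pyGetD ids (idx : Int) "" = getStrip rows[idx] "id" := by
        rw [PySem.List.pyGetD_natCast]
        simp [hids, hlt]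
      have hdrop : rows.drop idx = rows[idx] :: rows.drop (idx + 1) :=
        List.drop_eq_getElem_cons hlt
      rw [hdrop, PySem.List.enumerate_cons, List.flatMap_cons]
      simp only [hrow, hrid]
      have hcast : ((idx : Int) + 1) = ((idx + 1 : Nat) : Int) := by push_cast; ring
      rw [hcast, ih (idx + 1) (by omega)]
      simp only [rowErrA]
      by_cases h1 : getStrip rows[idx] "id" = ""
      · rw [if_pos h1, if_pos h1]
      · have hgid : ids[idx]'hidslen = getStrip rows[idx] "id" := by
          simp [hids]
        have hsl1 : PySem.List.slice ids none (some (idx : Int)) = ids.take idx :=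
          PySem.List.slice_to_natCast ids idx
        have hsl2 : PySem.List.slice ids (some ((idx + 1 : Nat) : Int)) none = ids.drop (idx + 1) :=
          PySem.List.slice_from_natCast ids (idx + 1)
        have hbr := dup_bridge ids idx hidslen
        rw [hgid] at hbr
        have hif : (if ((ids.take idx).contains (getStrip rows[idx] "id")
              || (ids.drop (idx + 1)).contains (getStrip rows[idx] "id")) = true then
            [((idx : Int), 0, "resource.id must be unique")]
          else ([] : List (Int × Int × String)))
          = (if (1 : Int) < (ids.count (getStrip rows[idx] "id") : Int) then
            [((idx : Int), 0, "resource.id must be unique")]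
          else ([] : List (Int × Int × String))) :=
          if_congr (by rw [Nat.one_lt_cast]; exact hbr) rfl rfl
        rw [if_neg h1, if_neg h1, hcounts _ h1, hsl1, hsl2, hif]

set_option maxHeartbeats 1000000 in
theorem build_resource_table_errors_spec : Claim_equal_build_resource_table_errors := by
  intro rows valid_protocols _
  unfold Spec_build_resource_table_errors build_resource_table_errors build_resource_table_errors_alt
  have hcounts : ∀ x, x ≠ "" →
      (rows.foldl (fun c row =>
        let resource_id := getStrip row "id"
        if resource_id ≠ "" then c.insert resource_id (c.getD resource_id 0 + 1) else c)
        PySem.Dict.empty).getD x 0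
      = ((rows.map (fun row => getStrip row "id")).count x : Int) := by
    intro x hx
    have h1 := counts_foldl (rows.map (fun row => getStrip row "id")) PySem.Dict.empty x hx
    rw [List.foldl_map] at h1
    simpa using h1
  have haux := rowErrors_eq_aux rows valid_protocols _ rfl _ hcounts rows.length 0 (by omega)
  have h2 := congrArg
    (fun l => List.foldl (fun d e => dset d e.1 e.2.1 e.2.2) ([] : List (Int × Int × String)) l)
    haux
  exact (main_fold rows valid_protocols _ 0 []).trans h2.symm
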